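-- pv_equiv track=rewrite | github.com/takealittletime/CodingTest | 백준/Gold/1039. 교환/교환.py | bfs
-- ===== SOURCE A (Python) =====
-- from collections import deque
--
-- def bfs(N,K):
--   visited = set()
--   queue = deque([(N,0)])
--   visited.add((N,0))
--
--   M = len(str(N))
--
--   answer = 0
--   while queue:
--     n, k = queue.popleft()
--     if k == K:
--       answer = max(answer,n)
--       continue
--     n = list(str(n))
--
--     for i in range(M-1):
--       for j in range(i+1,M):
--         if i == 0 and n[j] == '0':
--           continue
--         n[i],n[j] = n[j],n[i]
--         nnum = int(''.join(n))
--         if (nnum,k+1) not in visited: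
--           queue.append((nnum,k+1))
--           visited.add((nnum,k+1))
--         n[i],n[j] = n[j],n[i]
--   return answer if answer else -1
-- ===== SOURCE B (Python) =====
-- def bfs(N, K):
--     M = len(str(N))
--     frontier = {N}
--     for _ in range(K):
--         if not frontier:
--             break
--         nxt = set()
--         for n in frontier:
--             s = list(str(n))
--             for i in range(M - 1):
--                 for j in range(i + 1, M):
--                     if i == 0 and s[j] == '0':
--                         continue
--                     t = s.copy()
--                     t[i], t[j] = t[j], t[i]
--                     nxt.add(int(''.join(t)))
--         frontier = nxt
--     best = max(frontier, default=-1)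
--     return best if best > 0 else -1
-- ===== Notes on version B (the rewrite author's own statement) =====
-- stated objective: simpler
-- what changed: The queue-based BFS over (number, swap-count) pairs with a global visited set is replaced by a level-synchronized BFS: a plain set of numbers reachable with exactly k swaps is advanced K times, eliminating the deque, the swap-count state dimension and the cross-level visited bookkeeping.
-- outside the precondition, e.g. on bfs(5, -1): A returns -1, B returns 5
import Mathlib
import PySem

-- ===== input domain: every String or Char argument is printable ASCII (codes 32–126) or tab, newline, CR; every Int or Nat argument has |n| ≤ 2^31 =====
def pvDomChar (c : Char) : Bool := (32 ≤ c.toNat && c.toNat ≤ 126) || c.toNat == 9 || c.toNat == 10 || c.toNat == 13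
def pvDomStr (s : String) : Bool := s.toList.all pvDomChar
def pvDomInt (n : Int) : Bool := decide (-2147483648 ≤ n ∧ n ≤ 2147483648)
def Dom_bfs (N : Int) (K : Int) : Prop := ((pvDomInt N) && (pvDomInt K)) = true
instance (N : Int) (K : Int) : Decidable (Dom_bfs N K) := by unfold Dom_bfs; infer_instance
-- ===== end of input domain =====

-- B replaces the queue-of-(number,swaps) BFS with a level-synchronized BFS over plain sets of
-- numbers, one set per swap count; same return value on the stated precondition.


-- ===== PORT A =====

-- Shared leaf helper: both Python sources contain the identical snippet
--   n[i], n[j] = n[j], n[i]; int(''.join(n))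
-- (A swaps in place and swaps back, B swaps on a fresh copy — functionally the same value).
-- `none` is exactly where Python would raise (IndexError on the reads, ValueError in int());
-- callers only pass 0 ≤ i < j, so the in-place double `set` is Python-exact there.
def swapChild (s : List Char) (i j : Int) : Option Int :=
  match PySem.List.pyGet? s i, PySem.List.pyGet? s j with
  | some ci, some cj => PySem.Int.ofChars? ((s.set i.toNat cj).set j.toNat ci)
  | _, _ => none

-- A's queue/visited push: `if (nnum,k+1) not in visited: queue.append(…); visited.add(…)`
def pushPair (lev : Int) (st : List (Int × Int) × PySem.Set (Int × Int)) (c : Int) :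
    List (Int × Int) × PySem.Set (Int × Int) :=
  if PySem.Set.contains st.2 (c, lev) then st else (st.1 ++ [(c, lev)], PySem.Set.add st.2 (c, lev))

-- A's inner double loop over i < j (the `continue`s become identity steps; the `none` branches
-- are where A's Python raises — excluded by Pre_bfs below).
def expandA (M k : Int) (n : Int) (st : List (Int × Int) × PySem.Set (Int × Int)) :
    List (Int × Int) × PySem.Set (Int × Int) :=
  let s := PySem.Int.toChars n
  (PySem.List.pyRange 0 (M-1)).foldl (fun st i =>
    (PySem.List.pyRange (i+1) M).foldl (fun st j =>
      match PySem.List.pyGet? s j with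
      | none => st
      | some cj =>
        if i == 0 && cj == '0' then st
        else match swapChild s i j with
          | none => st
          | some c => pushPair (k+1) st c) st) st

-- termination measure for the while loop: each queue entry at level k weighs (M²+2)^(K-k)
def qWeight (K M : Int) (queue : List (Int × Int)) : Nat :=
  (queue.map (fun p => (M.toNat * M.toNat + 2) ^ ((K - p.2).toNat))).sum

-- termination helper: a fold whose every step appends at most c level-`lev` pairs to the queue
lemma foldl_pushes_many {α : Type} (lev : Int) (c : Nat)
    (g : List (Int × Int) × PySem.Set (Int × Int) → α → List (Int × Int) × PySem.Set (Int × Int)) :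
    ∀ (l : List α), (∀ st a, a ∈ l → ∃ adds, (g st a).1 = st.1 ++ adds ∧ adds.length ≤ c ∧
        ∀ p ∈ adds, p.2 = lev) →
      ∀ st, ∃ adds, (l.foldl g st).1 = st.1 ++ adds ∧ adds.length ≤ c * l.length ∧
        ∀ p ∈ adds, p.2 = lev := by
  intro l
  induction l with
  | nil => intro _ st; exact ⟨[], by simp⟩
  | cons a l ih =>
    intro hg st
    obtain ⟨adds₁, h1, hl1, hp1⟩ := hg st a (by simp)
    obtain ⟨adds₂, h2, hl2, hp2⟩ := ih (fun st b hb => hg st b (by simp [hb])) (g st a)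
    refine ⟨adds₁ ++ adds₂, ?_, ?_, ?_⟩
    · rw [List.foldl_cons, h2, h1, List.append_assoc]
    · simp only [List.length_append, List.length_cons]
      calc adds₁.length + adds₂.length ≤ c + c * l.length := by omega
        _ = c * (l.length + 1) := by ring
    · intro p hp; rcases List.mem_append.1 hp with h | h
      · exact hp1 p h
      · exact hp2 p h

lemma expandA_shape (M k n : Int) (st : List (Int × Int) × PySem.Set (Int × Int)) :
    ∃ adds, (expandA M k n st).1 = st.1 ++ adds ∧ adds.length ≤ M.toNat * M.toNat ∧
      ∀ p ∈ adds, p.2 = k + 1 := by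
  unfold expandA
  have houter := foldl_pushes_many (lev := k+1) (c := M.toNat)
    (g := fun st i =>
      (PySem.List.pyRange (i+1) M).foldl (fun st j =>
        match PySem.List.pyGet? (PySem.Int.toChars n) j with
        | none => st
        | some cj =>
          if i == 0 && cj == '0' then st
          else match swapChild (PySem.Int.toChars n) i j with
            | none => st
            | some c => pushPair (k+1) st c) st)
    (PySem.List.pyRange 0 (M-1)) ?_ st
  · obtain ⟨adds, h1, h2, h3⟩ := houter
    refine ⟨adds, h1, ?_, h3⟩
    calc adds.length ≤ M.toNat * (PySem.List.pyRange 0 (M-1)).length := h2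
      _ ≤ M.toNat * M.toNat := by
          rw [PySem.List.length_pyRange_one]; exact Nat.mul_le_mul_left _ (by omega)
  · intro st i hi
    have hinner := foldl_pushes_many (lev := k+1) (c := 1)
      (g := fun st j =>
        match PySem.List.pyGet? (PySem.Int.toChars n) j with
        | none => st
        | some cj =>
          if i == 0 && cj == '0' then st
          else match swapChild (PySem.Int.toChars n) i j with
            | none => st
            | some c => pushPair (k+1) st c)
      (PySem.List.pyRange (i+1) M) ?_ st
    · obtain ⟨adds, h1, h2, h3⟩ := hinner
      refine ⟨adds, h1, ?_, h3⟩
      have hi' : 0 ≤ i := (PySem.List.mem_pyRange_one.1 hi).1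
      calc adds.length ≤ 1 * (PySem.List.pyRange (i+1) M).length := h2
        _ ≤ M.toNat := by rw [one_mul, PySem.List.length_pyRange_one]; omega
    · intro st j _
      cases hpg : PySem.List.pyGet? (PySem.Int.toChars n) j with
      | none => exact ⟨[], by simp [hpg]⟩
      | some cj =>
        by_cases hz : (i == 0 && cj == '0') = true
        · exact ⟨[], by simp [hpg, hz]⟩
        · cases hsc : swapChild (PySem.Int.toChars n) i j with
          | none => exact ⟨[], by simp [hpg, hz, hsc]⟩
          | some cc =>
            by_cases hc : (cc, k+1) ∈ st.2
            · exact ⟨[], by simp [hpg, hz, hsc, pushPair, hc]⟩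
            · exact ⟨[(cc, k+1)], by simp [hpg, hz, hsc, pushPair, hc]⟩

lemma qWeight_append (K M : Int) (l₁ l₂ : List (Int × Int)) :
    qWeight K M (l₁ ++ l₂) = qWeight K M l₁ + qWeight K M l₂ := by
  simp [qWeight]

-- port of A's `while queue:` loop; `answer` is the running max.
-- The `K < k` branch is a totality guard only: queue levels never exceed K in any run
-- (Python has no such branch and never reaches a state where it would fire).
def bfsLoop (K M : Int) (queue : List (Int × Int)) (visited : PySem.Set (Int × Int))
    (answer : Int) : Int :=
  match queue with
  | [] => answer
  | (n, k) :: rest =>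
    if k == K then bfsLoop K M rest visited (max answer n)
    else if K < k then bfsLoop K M rest visited answer
    else
      let st := expandA M k n (rest, visited)
      bfsLoop K M st.1 st.2 answer
termination_by qWeight K M queue
decreasing_by
  · exact Nat.lt_add_of_pos_left (pow_pos (by omega) _)
  · exact Nat.lt_add_of_pos_left (pow_pos (by omega) _)
  · rename_i hne hnlt
    obtain ⟨adds, h1, h2, h3⟩ := expandA_shape M k n (rest, visited)
    have hk : k < K := by
      have : k ≠ K := by simpa using hne
      omega
    have hsucc : (K - k).toNat = (K - (k+1)).toNat + 1 := by omega
    have hconst : qWeight K M adds ≤ adds.length * (M.toNat * M.toNat + 2) ^ ((K - (k+1)).toNat) := by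
      unfold qWeight
      have := List.sum_le_card_nsmul (adds.map (fun p => (M.toNat * M.toNat + 2) ^ ((K - p.2).toNat)))
        ((M.toNat * M.toNat + 2) ^ ((K - (k+1)).toNat)) ?_
      · simpa [smul_eq_mul] using this
      · intro x hx
        obtain ⟨p, hp, rfl⟩ := List.mem_map.1 hx
        rw [h3 p hp]
    calc qWeight K M (expandA M k n (rest, visited)).1
        = qWeight K M rest + qWeight K M adds := by rw [h1, qWeight_append]
      _ ≤ qWeight K M rest + adds.length * (M.toNat * M.toNat + 2) ^ ((K - (k+1)).toNat) := by omega
      _ < qWeight K M rest + (M.toNat * M.toNat + 2) ^ ((K - k).toNat) := by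
          have hpos : 0 < (M.toNat * M.toNat + 2) ^ ((K - (k+1)).toNat) :=
            pow_pos (by omega) _
          have : adds.length * (M.toNat * M.toNat + 2) ^ ((K - (k+1)).toNat)
              < (M.toNat * M.toNat + 2) ^ ((K - k).toNat) := by
            rw [hsucc, pow_succ]
            calc adds.length * (M.toNat * M.toNat + 2) ^ ((K - (k+1)).toNat)
                ≤ (M.toNat * M.toNat) * (M.toNat * M.toNat + 2) ^ ((K - (k+1)).toNat) :=
                  Nat.mul_le_mul_right _ h2
              _ < (M.toNat * M.toNat + 2) ^ ((K - (k+1)).toNat) * (M.toNat * M.toNat + 2) := by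
                  rw [mul_comm ((M.toNat * M.toNat + 2) ^ ((K - (k+1)).toNat))]
                  exact (Nat.mul_lt_mul_right hpos).2 (by omega)
          omega
      _ = qWeight K M ((n, k) :: rest) := by
          show _ = qWeight K M ([(n, k)] ++ rest)
          rw [qWeight_append]; simp [qWeight]; ring

def bfs (N : Int) (K : Int) : Int :=
  let M : Int := ((PySem.Int.toChars N).length : Int)      -- M = len(str(N))
  let answer := bfsLoop K M [(N, 0)] (PySem.Set.add PySem.Set.empty (N, 0)) 0
  if answer == 0 then -1 else answer                       -- `answer if answer else -1`

-- ===== PORT B =====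

-- one number's swap neighbours added into the level-(k+1) set (B's inner double loop)
def levelStep (M : Int) (nxt : PySem.Set Int) (n : Int) : PySem.Set Int :=
  let s := PySem.Int.toChars n
  (PySem.List.pyRange 0 (M-1)).foldl (fun nxt i =>
    (PySem.List.pyRange (i+1) M).foldl (fun nxt j =>
      match PySem.List.pyGet? s j with
      | none => nxt
      | some cj =>
        if i == 0 && cj == '0' then nxt
        else match swapChild s i j with
          | none => nxt
          | some c => PySem.Set.add nxt c) nxt) nxt

-- `for _ in range(K): if not frontier: break; …` — K.toNat counted iterations, stopping early
def levelIter (M : Int) : Nat → PySem.Set Int → PySem.Set Int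
  | 0, fr => fr
  | t+1, fr =>
    if fr.isEmpty then fr
    else levelIter M t (fr.foldl (levelStep M) PySem.Set.empty)

def bfs_alt (N : Int) (K : Int) : Int :=
  let M : Int := ((PySem.Int.toChars N).length : Int)
  let frontier := levelIter M K.toNat (PySem.Set.add PySem.Set.empty N)
  let best := PySem.List.maxD frontier (fun x => x) (-1)   -- max(frontier, default=-1)
  if best > 0 then best else -1

-- ===== PRECONDITION & SPEC =====

-- Pre_ excludes negative K (a negative swap count, outside the task's natural domain: there A
-- diverges for N ≥ 10 and for single-digit N returns -1 only because the queue happens to empty,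
-- while B returns N), and negative N with K ≥ 1 (A raises ValueError when a swap moves '-').
def Pre_bfs (N : Int) (K : Int) : Prop := 0 ≤ K ∧ (0 ≤ N ∨ K = 0)
instance (N : Int) (K : Int) : Decidable (Pre_bfs N K) := by unfold Pre_bfs; infer_instance

def pvWitness_bfs : Int × Int := (316, 1)

def Spec_bfs (N : Int) (K : Int) (out : Int) : Prop := out = bfs_alt N K
instance (N : Int) (K : Int) (out : Int) : Decidable (Spec_bfs N K out) := by
  unfold Spec_bfs; infer_instance

-- ===== CLAIM (what is proved, stated in full; the proofs are below) =====
def Claim_equal_bfs : Prop := ∀ (N : Int) (K : Int), Dom_bfs N K → Pre_bfs N K → Spec_bfs N K (bfs N K)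

-- ===== LEMMAS AND PROOFS =====

-- the per-(i,j) candidate child (none = skipped pair or a pair on which the Pythons raise)
def childAt (s : List Char) (i j : Int) : Option Int :=
  match PySem.List.pyGet? s j with
  | none => none
  | some cj => if i == 0 && cj == '0' then none else swapChild s i j

-- all candidate children of the digit list s, in loop order
def childList (M : Int) (s : List Char) : List Int :=
  (PySem.List.pyRange 0 (M-1)).flatMap (fun i =>
    (PySem.List.pyRange (i+1) M).filterMap (fun j => childAt s i j))

-- one loop step that skips when its candidate is none
def optStep {α β γ : Type} (g : α → Option β) (h : γ → β → γ) (st : γ) (a : α) : γ :=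
  match g a with | none => st | some c => h st c

lemma foldl_skip_filterMap {α β γ : Type} (g : α → Option β) (h : γ → β → γ) :
    ∀ (l : List α) (init : γ),
      l.foldl (optStep g h) init = (l.filterMap g).foldl h init := by
  intro l
  induction l with
  | nil => intro init; rfl
  | cons a l ih =>
    intro init
    cases hg : g a <;> simp [optStep, hg, ih]

lemma foldl_flatMap' {α β γ : Type} (f : α → List β) (h : γ → β → γ) :
    ∀ (l : List α) (init : γ),
      (l.flatMap f).foldl h init = l.foldl (fun st a => (f a).foldl h st) init := by
  intro l
  induction l with
  | nil => intro init; rfl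
  | cons a l ih => intro init; simp [List.flatMap_cons, List.foldl_append, ih]

-- both inner double loops are a fold of their push over childList
lemma double_fold_eq {γ : Type} (M : Int) (s : List Char) (h : γ → Int → γ) (init : γ) :
    (PySem.List.pyRange 0 (M-1)).foldl (fun st i =>
      (PySem.List.pyRange (i+1) M).foldl (fun st j =>
        match PySem.List.pyGet? s j with
        | none => st
        | some cj =>
          if i == 0 && cj == '0' then st
          else match swapChild s i j with
            | none => st
            | some c => h st c) st) init
    = (childList M s).foldl h init := by
  unfold childList
  rw [foldl_flatMap']
  apply PySem.List.foldl_congr_mem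
  intro st i _
  rw [PySem.List.foldl_congr_mem _ _
    (optStep (fun j => childAt s i j) h) _ ?_]
  · exact foldl_skip_filterMap (fun j => childAt s i j) h (PySem.List.pyRange (i+1) M) st
  · intro acc j _
    cases hpg : PySem.List.pyGet? s j with
    | none => simp [optStep, childAt, hpg]
    | some cj =>
      by_cases hz : (i == 0 && cj == '0') = true
      · simp [optStep, childAt, hpg, hz]
      · cases hsc : swapChild s i j <;> simp [optStep, childAt, hpg, hz, hsc]

lemma expandA_eq (M k n : Int) (st : List (Int × Int) × PySem.Set (Int × Int)) :
    expandA M k n st = (childList M (PySem.Int.toChars n)).foldl (pushPair (k+1)) st := by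
  unfold expandA
  exact double_fold_eq M (PySem.Int.toChars n) (pushPair (k+1)) st

def stepChild (M : Int) (S : PySem.Set Int) (n : Int) : PySem.Set Int :=
  (childList M (PySem.Int.toChars n)).foldl PySem.Set.add S

lemma levelStep_eq (M : Int) (S : PySem.Set Int) (n : Int) :
    levelStep M S n = stepChild M S n := by
  unfold levelStep stepChild
  exact double_fold_eq M (PySem.Int.toChars n) PySem.Set.add S

def nextF (M : Int) (fr : PySem.Set Int) : PySem.Set Int :=
  fr.foldl (stepChild M) PySem.Set.empty

-- the level-view of A's loop: t more levels, current frontier fr, running max ans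
def levelsMax (M : Int) : Nat → PySem.Set Int → Int → Int
  | 0, fr, ans => fr.foldl max ans
  | (t+1), fr, ans => levelsMax M t (nextF M fr) ans

-- simulation of one level's pushes: queue appends + visited adds = set adds
lemma push_sim (lev : Int) :
    ∀ (cs : List Int) (base : List (Int × Int)) (S : PySem.Set Int)
      (vis : PySem.Set (Int × Int)),
      (∀ c : Int, (c, lev) ∈ vis ↔ c ∈ S) →
      cs.foldl (pushPair lev) (base ++ S.map (fun c => (c, lev)), vis)
        = (base ++ (cs.foldl PySem.Set.add S).map (fun c => (c, lev)),
           cs.foldl (fun v c => PySem.Set.add v (c, lev)) vis) := by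
  intro cs
  induction cs with
  | nil => intro base S vis _; rfl
  | cons c cs ih =>
    intro base S vis hIff
    simp only [List.foldl_cons]
    by_cases hm : c ∈ S
    · have hv : (c, lev) ∈ vis := (hIff c).2 hm
      rw [show pushPair lev (base ++ S.map (fun c => (c, lev)), vis) c
            = (base ++ S.map (fun c => (c, lev)), vis) by simp [pushPair, hv]]
      rw [PySem.Set.add_of_mem hm, PySem.Set.add_of_mem hv]
      exact ih base S vis hIff
    · have hv : (c, lev) ∉ vis := fun h => hm ((hIff c).1 h)
      rw [show pushPair lev (base ++ S.map (fun c => (c, lev)), vis) c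
            = (base ++ (S ++ [c]).map (fun c => (c, lev)), PySem.Set.add vis (c, lev)) by
          simp [pushPair, hv]]
      rw [PySem.Set.add_of_not_mem hm, PySem.Set.add_of_not_mem hv]
      apply ih
      intro c'
      constructor
      · intro h
        rcases List.mem_append.1 h with h | h
        · exact List.mem_append_left _ ((hIff c').1 h)
        · simp at h; simp [h]
      · intro h
        rcases List.mem_append.1 h with h | h
        · exact List.mem_append_left _ ((hIff c').2 h)
        · simp at h; simp [h]

-- draining the final level: every pop hits the `k == K` branch
lemma drain (K M : Int) :
    ∀ (xs : List Int) (vis : PySem.Set (Int × Int)) (ans : Int),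
      bfsLoop K M (xs.map (fun c => (c, K))) vis ans = xs.foldl max ans := by
  intro xs
  induction xs with
  | nil =>
    intro vis ans
    rw [List.map_nil, bfsLoop.eq_def]
    rfl
  | cons x xs ih =>
    intro vis ans
    rw [List.map_cons, bfsLoop.eq_def]
    simp only [beq_self_eq_true, if_true]
    rw [List.foldl_cons]
    exact ih vis (max ans x)

lemma level_run (K M k : Int) (hkK : k < K) (t : Nat)
    (IH : ∀ (fr : PySem.Set Int) (vis : PySem.Set (Int × Int)) (ans : Int),
      (∀ p ∈ vis, p.2 ≤ k + 1) →
      bfsLoop K M (fr.map (fun c => (c, k+1))) vis ans = levelsMax M t fr ans) :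
    ∀ (cur : List Int) (S : PySem.Set Int) (vis : PySem.Set (Int × Int)) (ans : Int),
      (∀ c : Int, (c, k+1) ∈ vis ↔ c ∈ S) → (∀ p ∈ vis, p.2 ≤ k + 1) →
      bfsLoop K M (cur.map (fun c => (c, k)) ++ S.map (fun c => (c, k+1))) vis ans
        = levelsMax M t (cur.foldl (stepChild M) S) ans := by
  intro cur
  induction cur with
  | nil =>
    intro S vis ans _ hle
    simpa using IH S vis ans hle
  | cons n cur ihc =>
    intro S vis ans hIff hle
    rw [List.map_cons, List.cons_append, bfsLoop]
    have h1 : (k == K) = false := by simp; omega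
    have h2 : ¬ K < k := by omega
    simp only [h1, Bool.false_eq_true, if_false, h2, if_false]
    rw [expandA_eq, push_sim (k+1) _ _ _ _ hIff]
    have hIff' : ∀ c : Int,
        (c, k+1) ∈ (childList M (PySem.Int.toChars n)).foldl
          (fun v c => PySem.Set.add v (c, k+1)) vis
        ↔ c ∈ (childList M (PySem.Int.toChars n)).foldl PySem.Set.add S := by
      intro c
      rw [PySem.Set.mem_foldl_add (f := fun c => (c, k+1))]
      have : c ∈ (childList M (PySem.Int.toChars n)).foldl PySem.Set.add S
          ↔ c ∈ S ∨ ∃ b ∈ childList M (PySem.Int.toChars n), c = b := by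
        exact PySem.Set.mem_foldl_add (childList M (PySem.Int.toChars n)) (fun b => b) S c
      rw [this, hIff c]
      constructor
      · rintro (h | ⟨b, hb, he⟩)
        · exact Or.inl h
        · exact Or.inr ⟨b, hb, by simpa using he⟩
      · rintro (h | ⟨b, hb, rfl⟩)
        · exact Or.inl h
        · exact Or.inr ⟨_, hb, rfl⟩
    have hle' : ∀ p ∈ (childList M (PySem.Int.toChars n)).foldl
        (fun v c => PySem.Set.add v (c, k+1)) vis, p.2 ≤ k + 1 := by
      intro p hp
      rcases (PySem.Set.mem_foldl_add (f := fun c => (c, k+1)) _ _ p).1 hp with h | ⟨b, _, rfl⟩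
      · exact hle p h
      · simp
    have := ihc (stepChild M S n)
      ((childList M (PySem.Int.toChars n)).foldl (fun v c => PySem.Set.add v (c, k+1)) vis)
      ans hIff' hle'
    simpa [stepChild] using this

lemma main_sim (K M : Int) :
    ∀ (t : Nat) (k : Int) (fr : PySem.Set Int) (vis : PySem.Set (Int × Int)) (ans : Int),
      k ≤ K → (K - k).toNat = t → (∀ p ∈ vis, p.2 ≤ k) →
      bfsLoop K M (fr.map (fun c => (c, k))) vis ans = levelsMax M t fr ans := by
  intro t
  induction t with
  | zero =>
    intro k fr vis ans hk ht _
    obtain rfl : k = K := by omega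
    exact drain _ _ fr vis ans
  | succ t ih =>
    intro k fr vis ans hk ht hle
    have hkK : k < K := by omega
    have hIff : ∀ c : Int, (c, k+1) ∈ vis ↔ c ∈ (PySem.Set.empty : PySem.Set Int) := by
      intro c
      constructor
      · intro h
        have h2 : k + 1 ≤ k := hle _ h
        omega
      · intro h
        simp [PySem.Set.empty] at h
    have := level_run K M k hkK t
      (fun fr' vis' ans' hle' => ih (k+1) fr' vis' ans' (by omega) (by omega) hle')
      fr PySem.Set.empty vis ans hIff (fun p hp => by have := hle p hp; omega)
    simpa [levelsMax, nextF] using this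

lemma levelsMax_iter (M : Int) :
    ∀ (t : Nat) (fr : PySem.Set Int) (ans : Int),
      levelsMax M t fr ans = ((nextF M)^[t] fr).foldl max ans := by
  intro t
  induction t with
  | zero => intro fr ans; rfl
  | succ t ih =>
    intro fr ans
    rw [show levelsMax M (t+1) fr ans = levelsMax M t (nextF M fr) ans from rfl, ih,
      Function.iterate_succ_apply]

lemma iterate_nextF_nil (M : Int) : ∀ t : Nat, (nextF M)^[t] ([] : PySem.Set Int) = [] := by
  intro t
  induction t with
  | zero => rfl
  | succ t ih => rw [Function.iterate_succ_apply, show nextF M [] = [] from rfl, ih]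

lemma levelIter_eq (M : Int) : ∀ (t : Nat) (fr : PySem.Set Int),
    levelIter M t fr = (nextF M)^[t] fr := by
  intro t
  induction t with
  | zero => intro fr; rfl
  | succ t ih =>
    intro fr
    cases fr with
    | nil =>
      rw [show levelIter M (t+1) [] = [] from rfl, Function.iterate_succ_apply,
        show nextF M [] = [] from rfl, iterate_nextF_nil]
    | cons x tl =>
      rw [show levelIter M (t+1) (x :: tl)
            = levelIter M t ((x :: tl).foldl (levelStep M) PySem.Set.empty) by
          rw [levelIter, List.isEmpty_cons, if_neg (by simp)],
        ih, Function.iterate_succ_apply]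
      congr 1
      exact PySem.List.foldl_congr_mem (x :: tl) _ _ _ (fun acc y _ => levelStep_eq _ acc y)

lemma foldl_max_comm : ∀ (l : List Int) (a b : Int), l.foldl max (max a b) = max a (l.foldl max b) := by
  intro l
  induction l with
  | nil => intro a b; rfl
  | cons x l ih => intro a b; simp only [List.foldl_cons, max_assoc, ih]

-- A's `answer if answer else -1` agrees with B's `max(frontier, default=-1)` + positivity test
lemma final_eq (L : List Int) :
    (if (L.foldl max 0 == 0) = true then (-1 : Int) else L.foldl max 0)
      = (if PySem.List.maxD L (fun x => x) (-1) > 0 then PySem.List.maxD L (fun x => x) (-1)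
         else -1) := by
  cases L with
  | nil =>
    have : PySem.List.max? ([] : List Int) (fun x => x) = none := by
      rw [PySem.List.max?_eq_none_iff]
    simp [PySem.List.maxD, this]
  | cons x t =>
    have hmax : PySem.List.maxD (x :: t) (fun x => x) (-1) = t.foldl max x := by
      simp [PySem.List.maxD, PySem.List.max?_id_cons]
    rw [hmax]
    have : (x :: t).foldl max 0 = max 0 (t.foldl max x) := by
      simp only [List.foldl_cons]; exact foldl_max_comm t 0 x
    rw [this]
    by_cases h : t.foldl max x ≤ 0
    · rw [max_eq_left h]; simp; omega
    · have h' : 0 < t.foldl max x := by omega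
      rw [max_eq_right (le_of_lt h')]
      have h1 : (t.foldl max x == 0) = false := by simp; omega
      simp [h1]; omega

-- ===== VERDICT (by name: the statement is the Claim_ definition above) =====
theorem bfs_spec : Claim_equal_bfs := by
  intro N K _ hpre
  unfold Spec_bfs
  simp only [bfs, bfs_alt]
  have hK : 0 ≤ K := hpre.1
  have hq : [(N, (0 : Int))] = (PySem.Set.add PySem.Set.empty N).map (fun c => (c, (0 : Int))) := rfl
  rw [hq, main_sim K ((PySem.Int.toChars N).length : Int) K.toNat 0 _ _ 0 hK (by omega)
    (by intro p hp; simp [PySem.Set.empty, PySem.Set.add, PySem.Set.contains] at hp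
        simp [hp])]
  rw [levelsMax_iter, levelIter_eq]
  exact final_eq _
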